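-- pv_equiv track=rewrite | github.com/ulel/advent_of_code | 2018/06/aoc_06.py | closest_location
-- ===== SOURCE A (Python) =====
-- import math
--
-- def closest_location(point, locations, max_range=10000):
--     closest_distance = math.inf
--     closest_location = None
--     total_distance = 0
--
--     for location in locations:
--         distance = abs((point[0] - location[0])) + abs((point[1] - location[1]))
--         total_distance += distance
--         if distance < closest_distance:
--             closest_location = location
--             closest_distance = distance
--         elif distance == closest_distance:
--             closest_location = None
--
--     return (closest_location, total_distance < max_range)
-- ===== SOURCE B (Python) =====
-- def closest_location(point, locations, max_range=10000):
--     dists = [abs(point[0] - x) + abs(point[1] - y) for x, y in locations]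
--     total = sum(dists)
--     if not dists:
--         return (None, total < max_range)
--     mn = min(dists)
--     closest = None if dists.count(mn) > 1 else locations[dists.index(mn)]
--     return (closest, total < max_range)
-- ===== Notes on version B (the rewrite author's own statement) =====
-- stated objective: simpler
-- what changed: Replaces the fused single-pass scan tracking (closest, closest_distance, total) through three mutated variables with a precompute-then-aggregate decomposition: build the distance list once, then use sum/min/count/index to read off the answer (None iff the minimum distance is not unique, else the first argmin location).
import Mathlib
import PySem

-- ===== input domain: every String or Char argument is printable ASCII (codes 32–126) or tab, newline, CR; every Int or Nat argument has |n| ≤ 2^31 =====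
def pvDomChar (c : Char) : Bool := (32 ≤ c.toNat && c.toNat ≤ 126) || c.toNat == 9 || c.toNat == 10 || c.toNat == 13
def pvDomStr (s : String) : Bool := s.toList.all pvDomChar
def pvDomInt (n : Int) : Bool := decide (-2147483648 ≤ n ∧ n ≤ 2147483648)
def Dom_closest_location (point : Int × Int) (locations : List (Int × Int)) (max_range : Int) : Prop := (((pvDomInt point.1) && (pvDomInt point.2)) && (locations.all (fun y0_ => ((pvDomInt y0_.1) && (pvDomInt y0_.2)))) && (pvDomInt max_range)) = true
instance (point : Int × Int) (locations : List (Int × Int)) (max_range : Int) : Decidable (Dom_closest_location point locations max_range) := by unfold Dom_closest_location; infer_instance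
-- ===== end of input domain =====

-- B replaces A's fused single-pass scan by a precompute-then-aggregate decomposition
-- (distance list, then sum/min/count/index); objective: simpler, same cost.

-- ===== PORT A =====
-- state = (closest_location, closest_distance (none = math.inf), total_distance)
def closest_location (point : Int × Int) (locations : List (Int × Int)) (max_range : Int) : (Option (Int × Int)) × Bool :=
  let st := locations.foldl
    (fun (s : Option (Int × Int) × Option Int × Int) loc =>
      let distance := |point.1 - loc.1| + |point.2 - loc.2|
      let total := s.2.2 + distance
      match s.2.1 with
      | none => (some loc, some distance, total)      -- distance < inf
      | some cd =>
        if distance < cd then (some loc, some distance, total)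
        else if distance = cd then (none, some cd, total)
        else (s.1, some cd, total))
    (none, none, 0)
  (st.1, decide (st.2.2 < max_range))

-- ===== PORT B =====
def closest_location_alt (point : Int × Int) (locations : List (Int × Int)) (max_range : Int) : (Option (Int × Int)) × Bool :=
  let dists := locations.map (fun l => |point.1 - l.1| + |point.2 - l.2|)
  let total := dists.sum
  match PySem.List.min? dists (fun x => x) with   -- none ↔ 'not dists'
  | none => (none, decide (total < max_range))
  | some mn =>
    let closest := if PySem.List.count dists mn > 1 then (none : Option (Int × Int))
      else (PySem.List.index? dists mn).bind (fun i => locations[i]?)  -- index is in range, so [·]? is exact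
    (closest, decide (total < max_range))

-- ===== PRECONDITION & SPEC =====
def Spec_closest_location (point : Int × Int) (locations : List (Int × Int)) (max_range : Int) (out : (Option (Int × Int)) × Bool) : Prop := out = closest_location_alt point locations max_range
instance (point : Int × Int) (locations : List (Int × Int)) (max_range : Int) (out : (Option (Int × Int)) × Bool) : Decidable (Spec_closest_location point locations max_range out) := by unfold Spec_closest_location; infer_instance

-- ===== CLAIM (what is proved, stated in full; the proofs are below) =====
def Claim_equal_closest_location : Prop := ∀ (point : Int × Int) (locations : List (Int × Int)) (max_range : Int), Dom_closest_location point locations max_range → Spec_closest_location point locations max_range (closest_location point locations max_range)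

-- ===== LEMMAS AND PROOFS =====

-- A's loop body, abstracted over the distance function
def pvStep (f : (Int × Int) → Int) (s : Option (Int × Int) × Option Int × Int) (loc : Int × Int) : Option (Int × Int) × Option Int × Int :=
  let distance := f loc
  let total := s.2.2 + distance
  match s.2.1 with
  | none => (some loc, some distance, total)
  | some cd =>
    if distance < cd then (some loc, some distance, total)
    else if distance = cd then (none, some cd, total)
    else (s.1, some cd, total)

-- the closest-location component A's loop ends in, starting from (res, some m, _)
def pvRes (f : (Int × Int) → Int) (locs : List (Int × Int)) (res : Option (Int × Int)) (m : Int) : Option (Int × Int) :=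
  let ds := locs.map f
  let mn := ds.foldl min m
  if mn = m then (if m ∈ ds then none else res)
  else if ds.count mn > 1 then none
  else (PySem.List.index? ds mn).bind (fun i => locs[i]?)

theorem pvA_eq (point : Int × Int) (locations : List (Int × Int)) (max_range : Int) :
    closest_location point locations max_range =
      ((locations.foldl (pvStep (fun l => |point.1 - l.1| + |point.2 - l.2|)) (none, none, 0)).1,
       decide ((locations.foldl (pvStep (fun l => |point.1 - l.1| + |point.2 - l.2|)) (none, none, 0)).2.2 < max_range)) := rfl

theorem pv_foldl_min_le (l : List Int) (a : Int) : l.foldl min a ≤ a := by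
  induction l generalizing a with
  | nil => simp
  | cons x t ih => exact le_trans (ih (min a x)) (min_le_left a x)

-- pvRes with the head's distance as the running minimum is what B computes on the whole list
theorem pvRes_head (f : (Int × Int) → Int) (l : Int × Int) (rest : List (Int × Int)) :
    pvRes f rest (some l) (f l) =
      (if ((l :: rest).map f).count ((rest.map f).foldl min (f l)) > 1 then none
       else (PySem.List.index? ((l :: rest).map f) ((rest.map f).foldl min (f l))).bind
            (fun i => (l :: rest)[i]?)) := by
  have hle := pv_foldl_min_le (rest.map f) (f l)
  rcases eq_or_lt_of_le hle with heq | hlt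
  · simp only [pvRes, heq, List.map_cons, List.count_cons, beq_self_eq_true, if_true]
    by_cases hmem : f l ∈ rest.map f
    · have hc : 0 < (rest.map f).count (f l) := List.count_pos_iff.mpr hmem
      rw [if_pos hmem, if_pos (by omega)]
    · have hc : (rest.map f).count (f l) = 0 := List.count_eq_zero.mpr hmem
      rw [PySem.List.index?_cons_self]
      simp [hc, hmem]
  · have hne : f l ≠ (rest.map f).foldl min (f l) := by omega
    simp only [pvRes, if_neg (ne_of_lt hlt), List.map_cons, List.count_cons,
      PySem.List.index?_cons_of_ne _ hne]
    simp [hne, Option.bind_map]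

theorem pvRes_cons_lt (f : (Int × Int) → Int) (l : Int × Int) (rest : List (Int × Int))
    (res : Option (Int × Int)) (m : Int) (h : f l < m) :
    pvRes f (l :: rest) res m = pvRes f rest (some l) (f l) := by
  have hle := pv_foldl_min_le (rest.map f) (f l)
  have hmin : min m (f l) = f l := min_eq_right h.le
  conv_lhs => simp only [pvRes, List.map_cons, List.foldl_cons, hmin]
  rw [if_neg (by omega), pvRes_head]
  simp only [List.map_cons]

theorem pvRes_cons_eq (f : (Int × Int) → Int) (l : Int × Int) (rest : List (Int × Int))
    (res : Option (Int × Int)) (m : Int) (h : f l = m) :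
    pvRes f (l :: rest) res m = pvRes f rest none m := by
  have hle := pv_foldl_min_le (rest.map f) m
  have hmin : min m (f l) = m := by omega
  conv_lhs => simp only [pvRes, List.map_cons, List.foldl_cons, hmin]
  rcases eq_or_lt_of_le hle with heq | hlt
  · rw [if_pos heq]
    simp [pvRes, heq, h]
  · have hne : f l ≠ (rest.map f).foldl min m := by omega
    rw [if_neg (ne_of_lt hlt)]
    conv_rhs => simp only [pvRes]
    rw [if_neg (ne_of_lt hlt), List.count_cons]
    simp only [beq_iff_eq, if_neg hne, PySem.List.index?_cons_of_ne _ hne]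
    by_cases hc : 1 < (rest.map f).count ((rest.map f).foldl min m)
    · rw [if_pos (by omega), if_pos hc]
    · rw [if_neg (by omega), if_neg hc]
      simp [Option.bind_map]

theorem pvRes_cons_gt (f : (Int × Int) → Int) (l : Int × Int) (rest : List (Int × Int))
    (res : Option (Int × Int)) (m : Int) (h : m < f l) :
    pvRes f (l :: rest) res m = pvRes f rest res m := by
  have hle := pv_foldl_min_le (rest.map f) m
  have hmin : min m (f l) = m := min_eq_left h.le
  conv_lhs => simp only [pvRes, List.map_cons, List.foldl_cons, hmin]
  rcases eq_or_lt_of_le hle with heq | hlt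
  · rw [if_pos heq]
    have hne : m ≠ f l := ne_of_lt h
    conv_rhs => simp only [pvRes]
    rw [if_pos heq]
    by_cases hm : m ∈ List.map f rest
    · rw [if_pos (List.mem_cons_of_mem _ hm), if_pos hm]
    · rw [if_neg (by simp [hne, hm]), if_neg hm]
  · have hne : f l ≠ (rest.map f).foldl min m := by omega
    rw [if_neg (ne_of_lt hlt)]
    conv_rhs => simp only [pvRes]
    rw [if_neg (ne_of_lt hlt), List.count_cons]
    simp only [beq_iff_eq, if_neg hne, PySem.List.index?_cons_of_ne _ hne]
    by_cases hc : 1 < (rest.map f).count ((rest.map f).foldl min m)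
    · rw [if_pos (by omega), if_pos hc]
    · rw [if_neg (by omega), if_neg hc]
      simp [Option.bind_map]

theorem pv_loop_char (f : (Int × Int) → Int) (locs : List (Int × Int))
    (res : Option (Int × Int)) (m t : Int) :
    locs.foldl (pvStep f) (res, some m, t) =
      (pvRes f locs res m, some ((locs.map f).foldl min m), t + (locs.map f).sum) := by
  induction locs generalizing res m t with
  | nil => simp [pvRes]
  | cons l rest ih =>
    have hstep : pvStep f (res, some m, t) l =
        (if f l < m then ((some l : Option (Int × Int)), (some (f l) : Option Int), t + f l)
         else if f l = m then (none, some m, t + f l)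
         else (res, some m, t + f l)) := by
      simp only [pvStep]
    rw [List.foldl_cons, hstep]
    by_cases h1 : f l < m
    · have hmin : min m (f l) = f l := min_eq_right h1.le
      rw [if_pos h1, ih]
      refine Prod.ext ?_ (Prod.ext ?_ ?_)
      · exact ((pvRes_cons_lt f l rest res m h1).symm : _)
      · simp [List.foldl_cons, hmin]
      · simp only [List.map_cons, List.sum_cons]
        ring
    · by_cases h2 : f l = m
      · have hmin : min m (f l) = m := by omega
        rw [if_neg h1, if_pos h2, ih]
        refine Prod.ext ?_ (Prod.ext ?_ ?_)
        · exact ((pvRes_cons_eq f l rest res m h2).symm : _)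
        · simp [List.foldl_cons, hmin]
        · simp only [List.map_cons, List.sum_cons, h2]
          ring
      · have h3 : m < f l := by omega
        have hmin : min m (f l) = m := min_eq_left h3.le
        rw [if_neg h1, if_neg h2, ih]
        refine Prod.ext ?_ (Prod.ext ?_ ?_)
        · exact ((pvRes_cons_gt f l rest res m h3).symm : _)
        · simp [List.foldl_cons, hmin]
        · simp only [List.map_cons, List.sum_cons]
          ring

-- ===== VERDICT (by name: the statement is the Claim_ definition above) =====
theorem closest_location_spec : Claim_equal_closest_location := by
  intro point locations max_range _
  show closest_location point locations max_range = closest_location_alt point locations max_range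
  rw [pvA_eq]
  cases locations with
  | nil => simp [closest_location_alt, PySem.List.min?]
  | cons l rest =>
    rw [List.foldl_cons]
    have h0 : pvStep (fun l => |point.1 - l.1| + |point.2 - l.2|) (none, none, 0) l =
        (some l, some (|point.1 - l.1| + |point.2 - l.2|), 0 + (|point.1 - l.1| + |point.2 - l.2|)) := rfl
    rw [h0, pv_loop_char, pvRes_head]
    simp only [closest_location_alt, List.map_cons, PySem.List.min?_id_cons]
    simp only [List.sum_cons, PySem.List.count, zero_add]
    rfl
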